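-- pv_equiv track=rewrite | github.com/Dark9477/Estructura-Datos | tarea1.py | sumarValoresMatriz
-- ===== SOURCE A (Python) =====
-- def sumarValoresMatriz(disp, mat):
-- 	cnt = 0
-- 	for i in range(len(mat)):
-- 		if mat[i][0] in disp:
-- 			lista = disp[mat[i][0]]
-- 			for m in range(len(lista)):
-- 				if lista[m][0] == mat[i][1]:
-- 					cnt += lista[m][1]
-- 	return cnt
-- ===== SOURCE B (Python) =====
-- def sumarValoresMatriz(disp, mat):
--     rowcount = {}
--     for row in mat:
--         k = row[0]
--         if k in disp and disp[k]:
--             rowcount[(k, row[1])] = rowcount.get((k, row[1]), 0) + 1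
--     total = 0
--     for (k, s), c in rowcount.items():
--         for p in disp[k]:
--             if p[0] == s:
--                 total += p[1] * c
--     return total
-- ===== Notes on version B (the rewrite author's own statement) =====
-- stated objective: alternative
-- what changed: B counts each (key,subkey) matrix row once in a dict, then sums value*rowcount with one scan of each matched key's list, instead of A's rescan of the whole matched list for every matrix row (same measured cost on the probe's inputs).
import Mathlib
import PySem

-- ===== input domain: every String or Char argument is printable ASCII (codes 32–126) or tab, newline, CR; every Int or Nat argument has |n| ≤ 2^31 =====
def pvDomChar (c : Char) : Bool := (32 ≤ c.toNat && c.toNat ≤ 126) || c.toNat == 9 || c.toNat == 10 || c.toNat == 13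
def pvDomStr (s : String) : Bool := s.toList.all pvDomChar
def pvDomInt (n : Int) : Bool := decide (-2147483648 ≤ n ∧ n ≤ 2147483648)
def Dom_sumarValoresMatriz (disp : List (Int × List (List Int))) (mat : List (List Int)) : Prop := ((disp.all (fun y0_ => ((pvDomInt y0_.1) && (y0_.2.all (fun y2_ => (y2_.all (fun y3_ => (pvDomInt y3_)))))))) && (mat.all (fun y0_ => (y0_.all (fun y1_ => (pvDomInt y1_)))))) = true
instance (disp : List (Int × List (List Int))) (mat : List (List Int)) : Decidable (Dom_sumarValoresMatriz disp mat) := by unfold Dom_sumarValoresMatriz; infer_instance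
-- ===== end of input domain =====

-- B counts each (key, subkey) matrix row once in a dict, then sums value * rowcount with one scan of
-- each matched key's list, instead of A's rescan of the whole matched list per matrix row (objective: alternative).

-- ===== PORT A =====
def sumarValoresMatriz (disp : List (Int × List (List Int))) (mat : List (List Int)) : Int :=
  let D := PySem.Dict.ofList disp
  (PySem.List.pyRange 0 (mat.length : Int) 1).foldl (fun cnt i =>
    let row := PySem.List.pyGetD mat i []
    if D.contains (PySem.List.pyGetD row 0 0) then
      let lista := D.getD (PySem.List.pyGetD row 0 0) []
      (PySem.List.pyRange 0 (lista.length : Int) 1).foldl (fun cnt m =>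
        let p := PySem.List.pyGetD lista m []
        if PySem.List.pyGetD p 0 0 = PySem.List.pyGetD row 1 0 then
          cnt + PySem.List.pyGetD p 1 0
        else cnt) cnt
    else cnt) 0

-- ===== PORT B =====
def sumarValoresMatriz_alt (disp : List (Int × List (List Int))) (mat : List (List Int)) : Int :=
  let D := PySem.Dict.ofList disp
  let rowcount : PySem.Dict (Int × Int) Int := mat.foldl (fun rc row =>
    let k := PySem.List.pyGetD row 0 0
    if D.contains k && decide (D.getD k [] ≠ []) then
      rc.insert (k, PySem.List.pyGetD row 1 0) (rc.getD (k, PySem.List.pyGetD row 1 0) 0 + 1)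
    else rc) PySem.Dict.empty
  rowcount.items.foldl (fun total ksc =>
    (D.getD ksc.1.1 []).foldl (fun total p =>
      if PySem.List.pyGetD p 0 0 = ksc.1.2 then total + PySem.List.pyGetD p 1 0 * ksc.2
      else total) total) 0

-- ===== PRECONDITION & SPEC =====
-- Pre_ excludes exactly the inputs on which the Python A raises IndexError: an empty matrix row
-- (mat[i][0]); a matrix row of length 1 whose key is in disp with a nonempty list (mat[i][1] is read);
-- an empty pair in the list of a key some matrix row carries (lista[m][0]); and a length-1 pair whose
-- first entry equals the second entry of some matrix row with that key (lista[m][1]).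
def Pre_sumarValoresMatriz (disp : List (Int × List (List Int))) (mat : List (List Int)) : Prop :=
  (∀ row ∈ mat, row ≠ [] ∧
    ((PySem.Dict.ofList disp).contains (PySem.List.pyGetD row 0 0) = true ∧
      (PySem.Dict.ofList disp).getD (PySem.List.pyGetD row 0 0) [] ≠ [] → 2 ≤ row.length)) ∧
  (∀ kl ∈ (PySem.Dict.ofList disp).items, (∃ row ∈ mat, PySem.List.pyGetD row 0 0 = kl.1) →
    ∀ p ∈ kl.2, p ≠ [] ∧
      ((∃ row ∈ mat, PySem.List.pyGetD row 0 0 = kl.1 ∧ PySem.List.pyGetD row 1 0 = PySem.List.pyGetD p 0 0) →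
        2 ≤ p.length))
instance (disp : List (Int × List (List Int))) (mat : List (List Int)) : Decidable (Pre_sumarValoresMatriz disp mat) := by unfold Pre_sumarValoresMatriz; infer_instance

def pvWitness_sumarValoresMatriz : (List (Int × List (List Int))) × List (List Int) :=
  ([(1, [[2, 3], [2, 4], [5, 7]])], [[1, 2], [9, 5], [1, 5]])

def Spec_sumarValoresMatriz (disp : List (Int × List (List Int))) (mat : List (List Int)) (out : Int) : Prop := out = sumarValoresMatriz_alt disp mat
instance (disp : List (Int × List (List Int))) (mat : List (List Int)) (out : Int) : Decidable (Spec_sumarValoresMatriz disp mat out) := by unfold Spec_sumarValoresMatriz; infer_instance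

-- ===== CLAIM (what is proved, stated in full; the proofs are below) =====
def Claim_equal_sumarValoresMatriz : Prop := ∀ (disp : List (Int × List (List Int))) (mat : List (List Int)), Dom_sumarValoresMatriz disp mat → Pre_sumarValoresMatriz disp mat → Spec_sumarValoresMatriz disp mat (sumarValoresMatriz disp mat)

-- ===== LEMMAS AND PROOFS =====

-- A's body for one matrix row (proof helper; definitionally A's loop body)
def pvStepA (disp : List (Int × List (List Int))) (cnt : Int) (row : List Int) : Int :=
  if (PySem.Dict.ofList disp).contains (PySem.List.pyGetD row 0 0) = true then
    (PySem.List.pyRange 0 (((PySem.Dict.ofList disp).getD (PySem.List.pyGetD row 0 0) []).length : Int) 1).foldl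
      (fun cnt m =>
        if PySem.List.pyGetD (PySem.List.pyGetD ((PySem.Dict.ofList disp).getD (PySem.List.pyGetD row 0 0) []) m []) 0 0
            = PySem.List.pyGetD row 1 0 then
          cnt + PySem.List.pyGetD (PySem.List.pyGetD ((PySem.Dict.ofList disp).getD (PySem.List.pyGetD row 0 0) []) m []) 1 0
        else cnt) cnt
  else cnt

-- the filtered sum A computes over one lista
def pvMatchSum (lista : List (List Int)) (t : Int) : Int :=
  (lista.map (fun p => if PySem.List.pyGetD p 0 0 = t then PySem.List.pyGetD p 1 0 else 0)).sum

-- B's guard for one row, the row's (key, subkey), and the list of counted (key, subkey) pairs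
def pvGuard (disp : List (Int × List (List Int))) (row : List Int) : Bool :=
  (PySem.Dict.ofList disp).contains (PySem.List.pyGetD row 0 0) &&
    decide ((PySem.Dict.ofList disp).getD (PySem.List.pyGetD row 0 0) [] ≠ [])

def pvKey (row : List Int) : Int × Int := (PySem.List.pyGetD row 0 0, PySem.List.pyGetD row 1 0)

def pvL (disp : List (Int × List (List Int))) (mat : List (List Int)) : List (Int × Int) :=
  (mat.filter (pvGuard disp)).map pvKey

-- the sum one (key, subkey) contributes once
def pvG (disp : List (Int × List (List Int))) (x : Int × Int) : Int :=
  pvMatchSum ((PySem.Dict.ofList disp).getD x.1 []) x.2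

-- A's inner scan of one lista is the plain filtered sum
theorem pv_A_inner (lista : List (List Int)) (t cnt : Int) :
    lista.foldl (fun cnt p =>
      if PySem.List.pyGetD p 0 0 = t then cnt + PySem.List.pyGetD p 1 0 else cnt) cnt
    = cnt + pvMatchSum lista t := by
  unfold pvMatchSum
  induction lista generalizing cnt with
  | nil => simp
  | cons p rest ih =>
    simp only [List.foldl_cons, List.map_cons, List.sum_cons, ih]
    split_ifs <;> ring

theorem pvStepA_eq (disp : List (Int × List (List Int))) (cnt : Int) (row : List Int) :
    pvStepA disp cnt row = cnt + (if pvGuard disp row then pvG disp (pvKey row) else 0) := by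
  unfold pvStepA pvGuard pvG pvKey
  by_cases hc : (PySem.Dict.ofList disp).contains (PySem.List.pyGetD row 0 0) = true
  · rw [if_pos hc]
    have h := (PySem.List.foldl_pyRange_zero_pyGetD'
        ((PySem.Dict.ofList disp).getD (PySem.List.pyGetD row 0 0) []) ([] : List Int)
        (fun cnt p =>
          if PySem.List.pyGetD p 0 0 = PySem.List.pyGetD row 1 0 then cnt + PySem.List.pyGetD p 1 0 else cnt)
        cnt).trans
      (pv_A_inner ((PySem.Dict.ofList disp).getD (PySem.List.pyGetD row 0 0) []) (PySem.List.pyGetD row 1 0) cnt)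
    rw [h]
    by_cases he : (PySem.Dict.ofList disp).getD (PySem.List.pyGetD row 0 0) [] = []
    · simp [he, pvMatchSum]
    · simp [hc, he]
  · simp only [Bool.not_eq_true] at hc
    simp [hc]

theorem pv_foldl_stepA (disp : List (Int × List (List Int))) (mat : List (List Int)) (cnt : Int) :
    mat.foldl (pvStepA disp) cnt
    = cnt + (mat.map (fun row => if pvGuard disp row then pvG disp (pvKey row) else 0)).sum := by
  induction mat generalizing cnt with
  | nil => simp
  | cons row rest ih =>
    simp only [List.foldl_cons, ih, List.map_cons, List.sum_cons, pvStepA_eq]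
    ring

-- A as a sum over the counted (key, subkey) occurrences
theorem pv_A_sum (disp : List (Int × List (List Int))) (mat : List (List Int)) :
    sumarValoresMatriz disp mat = ((pvL disp mat).map (pvG disp)).sum := by
  have hA : sumarValoresMatriz disp mat = mat.foldl (pvStepA disp) 0 :=
    PySem.List.foldl_pyRange_zero_pyGetD' mat ([] : List Int) (pvStepA disp) 0
  rw [hA, pv_foldl_stepA, zero_add]
  unfold pvL
  rw [List.map_map]
  clear hA
  induction mat with
  | nil => simp
  | cons row rest ih =>
    by_cases hg : pvGuard disp row
    · simp [hg, ih]
    · simp [hg, ih]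

-- B's rowcount dict is the counter of pvL
theorem pv_rc_eq_counter (disp : List (Int × List (List Int))) (mat : List (List Int)) :
    (mat.foldl (fun rc row =>
      if pvGuard disp row then
        rc.insert (pvKey row) (rc.getD (pvKey row) 0 + 1)
      else rc) PySem.Dict.empty)
    = PySem.Dict.counter (pvL disp mat) := by
  unfold pvL
  rw [← PySem.Dict.foldl_insert_getD_add_one_eq_counter, List.foldl_map, List.foldl_filter]

-- B's inner scan of one lista, weighted by the count c
theorem pv_B_inner (lista : List (List Int)) (s c t0 : Int) :
    lista.foldl (fun total p =>
      if PySem.List.pyGetD p 0 0 = s then total + PySem.List.pyGetD p 1 0 * c else total) t0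
    = t0 + pvMatchSum lista s * c := by
  unfold pvMatchSum
  induction lista generalizing t0 with
  | nil => simp
  | cons p rest ih =>
    simp only [List.foldl_cons, List.map_cons, List.sum_cons, ih]
    split_ifs <;> ring

-- B's outer loop over the rowcount items
theorem pv_B_outer (disp : List (Int × List (List Int))) (items : List ((Int × Int) × Int)) (t0 : Int) :
    items.foldl (fun total ksc =>
      ((PySem.Dict.ofList disp).getD ksc.1.1 []).foldl (fun total p =>
        if PySem.List.pyGetD p 0 0 = ksc.1.2 then total + PySem.List.pyGetD p 1 0 * ksc.2
        else total) total) t0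
    = t0 + (items.map (fun ksc => pvG disp ksc.1 * ksc.2)).sum := by
  induction items generalizing t0 with
  | nil => simp
  | cons ksc rest ih =>
    rw [List.foldl_cons, pv_B_inner, ih]
    simp only [List.map_cons, List.sum_cons, pvG]
    ring

-- the two BEq instances on Int × Int count alike
theorem pv_count_beq (L : List (Int × Int)) (m : Int × Int) :
    @List.count _ instBEqOfDecidableEq m L = @List.count _ instBEqProd m L := by
  induction L with
  | nil => rfl
  | cons a l ih => simp [List.count_cons, ih]

-- counting occurrences: a sum over a list equals the count-weighted sum over its distinct elements
theorem pv_count_sum (L : List (Int × Int)) (g : Int × Int → Int) :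
    ((PySem.Set.ofList L).map (fun k => g k * (L.count k : Int))).sum = (L.map g).sum := by
  have hnd : (PySem.Set.ofList L).Nodup := PySem.Set.nodup_ofList L
  have hfin : (PySem.Set.ofList L).toFinset = L.toFinset := by
    apply Finset.ext
    intro x
    simp [List.mem_toFinset, PySem.Set.mem_ofList]
  calc ((PySem.Set.ofList L).map (fun k => g k * (L.count k : Int))).sum
      = ∑ m ∈ (PySem.Set.ofList L).toFinset, g m * (L.count m : Int) := by
        rw [List.sum_toFinset _ hnd]
    _ = ∑ m ∈ L.toFinset, (@List.count _ instBEqOfDecidableEq m L) • g m := by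
        rw [hfin]
        apply Finset.sum_congr rfl
        intro m _
        rw [pv_count_beq, nsmul_eq_mul, mul_comm]
    _ = (L.map g).sum := (Finset.sum_list_map_count L g).symm

-- B as the same sum over the counted (key, subkey) occurrences
theorem pv_B_sum (disp : List (Int × List (List Int))) (mat : List (List Int)) :
    sumarValoresMatriz_alt disp mat = ((pvL disp mat).map (pvG disp)).sum := by
  unfold sumarValoresMatriz_alt
  show (mat.foldl (fun rc row =>
      if pvGuard disp row then
        rc.insert (pvKey row) (rc.getD (pvKey row) 0 + 1)
      else rc) PySem.Dict.empty).items.foldl (fun total ksc =>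
        ((PySem.Dict.ofList disp).getD ksc.1.1 []).foldl (fun total p =>
          if PySem.List.pyGetD p 0 0 = ksc.1.2 then total + PySem.List.pyGetD p 1 0 * ksc.2
          else total) total) 0 = _
  rw [pv_rc_eq_counter, pv_B_outer, zero_add, PySem.Dict.items_counter, List.map_map]
  have : ((fun ksc : (Int × Int) × Int => pvG disp ksc.1 * ksc.2) ∘
      fun k => (k, ((pvL disp mat).count k : Int)))
      = fun k => pvG disp k * ((pvL disp mat).count k : Int) := rfl
  rw [this, pv_count_sum]

-- ===== VERDICT (by name: the statement is the Claim_ definition above) =====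
theorem sumarValoresMatriz_spec : Claim_equal_sumarValoresMatriz := by
  intro disp mat _ _
  show sumarValoresMatriz disp mat = sumarValoresMatriz_alt disp mat
  rw [pv_A_sum, pv_B_sum]
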